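-- pv_equiv track=rewrite | github.com/naschorr/formula1-stats-bot | analyzer.py | appendListToDict
-- ===== SOURCE A (Python) =====
-- def appendListToDict(dictOut, listIn):
--         for i in listIn:
--             this = i[0]
--             if(this not in dictOut):
--                 dictOut[this] = 1
--             else:
--                 dictOut[this] += 1
--         return dictOut
-- ===== SOURCE B (Python) =====
-- def appendListToDict(dictOut, listIn):
--     # Key-centric two-phase rewrite: bump every key already in dictOut by its
--     # tally among listIn's first elements (via list.count), then append each
--     # genuinely new key, in first-occurrence order, with its tally.
--     # Mutates dictOut in place, like A.
--     firsts = [i[0] for i in listIn]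
--     for k in dictOut:
--         dictOut[k] += firsts.count(k)
--     for k in firsts:
--         if k not in dictOut:
--             dictOut[k] = firsts.count(k)
--     return dictOut
-- ===== Notes on version B (the rewrite author's own statement) =====
-- stated objective: alternative
-- what changed: A makes one interleaved pass over listIn, testing membership and incrementing counts directly in dictOut; B is key-centric: it first bumps every key already in dictOut by its tally among listIn's first elements via list.count, then appends each genuinely new key (first-occurrence order) with its tally — trading A's single dict-driven pass for count-based per-key arithmetic, which is the slower of the two on large inputs.
import Mathlib
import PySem

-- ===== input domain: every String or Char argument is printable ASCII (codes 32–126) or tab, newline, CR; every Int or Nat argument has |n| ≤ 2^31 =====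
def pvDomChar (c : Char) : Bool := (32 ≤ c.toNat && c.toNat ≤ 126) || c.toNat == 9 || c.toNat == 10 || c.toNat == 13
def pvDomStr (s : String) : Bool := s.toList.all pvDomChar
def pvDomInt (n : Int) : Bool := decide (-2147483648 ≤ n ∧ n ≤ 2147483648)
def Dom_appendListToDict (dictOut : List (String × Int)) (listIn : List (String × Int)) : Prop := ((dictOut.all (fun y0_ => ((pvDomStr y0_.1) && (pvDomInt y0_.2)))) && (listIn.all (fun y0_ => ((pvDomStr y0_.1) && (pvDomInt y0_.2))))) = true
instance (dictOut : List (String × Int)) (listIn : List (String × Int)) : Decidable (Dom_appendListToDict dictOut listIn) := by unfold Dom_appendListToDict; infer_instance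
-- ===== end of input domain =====

-- B replaces A's single interleaved count-into-dictOut pass by a key-centric two-phase
-- rewrite (bump existing keys via list.count, then append new keys with their counts),
-- trading the dict-driven pass for per-key arithmetic. A mutates dictOut in place in
-- Python (B does too); the equivalence proved here is about the returned value.

-- ===== PORT A =====
-- literal port of A: one loop over listIn, branching on membership in dictOut
def appendListToDict (dictOut : List (String × Int)) (listIn : List (String × Int)) : List (String × Int) :=
  (listIn.foldl
    (fun d i =>
      if !(d.contains i.1) then d.insert i.1 1
      else d.insert i.1 (d.getD i.1 0 + 1))   -- dictOut[this] += 1; key present in this branch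
    (PySem.Dict.mk dictOut)).items

-- ===== PORT B =====
-- literal port of Source B: phase 1 bumps each existing key by its tally among the first
-- elements (list.count); phase 2 appends each new key, first occurrence first, with its tally
def appendListToDict_alt (dictOut : List (String × Int)) (listIn : List (String × Int)) : List (String × Int) :=
  let firsts := listIn.map (fun i => i.1)
  let updated := dictOut.map (fun p => (p.1, p.2 + (firsts.count p.1 : Int)))
  firsts.foldl
    (fun d k =>
      if d.any (fun p => p.1 == k) then d          -- k already a key of dictOut
      else d ++ [(k, (firsts.count k : Int))])     -- dictOut[k] = firsts.count(k): new key appends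
    updated

-- ===== PRECONDITION & SPEC =====
-- dictOut stands for a Python dict, whose keys are necessarily distinct; Pre_ states just
-- that representation invariant (it excludes no input a Python caller can produce).
def Pre_appendListToDict (dictOut : List (String × Int)) (listIn : List (String × Int)) : Prop :=
  (dictOut.map Prod.fst).Nodup
instance (dictOut : List (String × Int)) (listIn : List (String × Int)) : Decidable (Pre_appendListToDict dictOut listIn) := by unfold Pre_appendListToDict; infer_instance
def pvWitness_appendListToDict : (List (String × Int)) × (List (String × Int)) :=
  ([("a", 2), ("b", -1)], [("a", 7), ("c", 0), ("a", 3)])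

def Spec_appendListToDict (dictOut : List (String × Int)) (listIn : List (String × Int)) (out : List (String × Int)) : Prop := out = appendListToDict_alt dictOut listIn
instance (dictOut : List (String × Int)) (listIn : List (String × Int)) (out : List (String × Int)) : Decidable (Spec_appendListToDict dictOut listIn out) := by unfold Spec_appendListToDict; infer_instance

-- ===== CLAIM (what is proved, stated in full; the proofs are below) =====
def Claim_equal_appendListToDict : Prop := ∀ (dictOut : List (String × Int)) (listIn : List (String × Int)), Dom_appendListToDict dictOut listIn → Pre_appendListToDict dictOut listIn → Spec_appendListToDict dictOut listIn (appendListToDict dictOut listIn)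

-- ===== LEMMAS AND PROOFS =====

-- A's branch is a single insert of the incremented value
lemma stepA_eq :
    (fun (d : PySem.Dict String Int) (i : String × Int) =>
      if !(d.contains i.1) then d.insert i.1 1
      else d.insert i.1 (d.getD i.1 0 + 1))
    = fun d i => d.insert i.1 (d.getD i.1 0 + 1) := by
  funext d i
  by_cases h : d.contains i.1
  · simp [h]
  · simp only [Bool.not_eq_true] at h
    simp [h, PySem.Dict.getD_of_not_contains _ _ h]

-- B's second phase appends exactly the first occurrences of keys not yet present,
-- each paired with c of it
lemma foldB (c : String → Int) :
    ∀ (ks : List String) (d : List (String × Int)),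
      ks.foldl
        (fun d k => if d.any (fun p => p.1 == k) then d else d ++ [(k, c k)]) d
      = d ++ ((PySem.Set.ofList ks).filter
            (fun y => !(PySem.Set.contains (d.map Prod.fst) y))).map (fun k => (k, c k)) := by
  intro ks
  induction ks with
  | nil => simp [PySem.Set.ofList_nil]
  | cons k t ih =>
    intro d
    have hmem : (d.any (fun p => p.1 == k)) = PySem.Set.contains (d.map Prod.fst) k := by
      rw [Bool.eq_iff_iff]
      simp [List.any_eq_true, PySem.Set.contains, List.mem_map]
    by_cases h : k ∈ d.map Prod.fst
    · have hc : PySem.Set.contains (d.map Prod.fst) k = true :=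
        (PySem.Set.contains_iff _ _).mpr h
      have hany : (d.any (fun p => p.1 == k)) = true := hmem.trans hc
      have hfil :
          ((PySem.Set.ofList t).discard k).filter
              (fun y => !(PySem.Set.contains (d.map Prod.fst) y))
            = (PySem.Set.ofList t).filter
                (fun y => !(PySem.Set.contains (d.map Prod.fst) y)) := by
        simp only [PySem.Set.discard, List.filter_filter]
        apply List.filter_congr
        intro y _
        by_cases hy : y = k
        · subst hy
          obtain ⟨p, hp, he⟩ := List.mem_map.mp h
          have hx : ∃ x, (y, x) ∈ d := ⟨p.2, by rw [← he, Prod.mk.eta]; exact hp⟩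
          simp [hx]
        · simp [hy]
      rw [List.foldl_cons, hany, if_pos rfl, ih d, PySem.Set.ofList_cons,
        List.filter_cons, hfil]
      simp [h]
    · have hc : PySem.Set.contains (d.map Prod.fst) k = false := by
        rw [Bool.eq_false_iff]
        intro hcc
        exact h ((PySem.Set.contains_iff _ _).mp hcc)
      have hany : (d.any (fun p => p.1 == k)) = false := hmem.trans hc
      have hfil :
          (PySem.Set.ofList t).filter
              (fun y => !(PySem.Set.contains ((d ++ [(k, c k)]).map Prod.fst) y))
            = ((PySem.Set.ofList t).discard k).filter
                (fun y => !(PySem.Set.contains (d.map Prod.fst) y)) := by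
        simp only [PySem.Set.discard, List.filter_filter]
        apply List.filter_congr
        intro y _
        simp only [List.map_append, List.map_cons, List.map_nil,
          PySem.Set.contains, List.contains_append, List.contains_cons,
          List.contains_nil, Bool.or_false, Bool.not_or]
      rw [List.foldl_cons, hany, if_neg (by simp), ih (d ++ [(k, c k)]), hfil,
        PySem.Set.ofList_cons, List.filter_cons]
      simp [h]

-- ===== VERDICT (by name: the statement is the Claim_ definition above) =====
theorem appendListToDict_spec : Claim_equal_appendListToDict := by
  intro dictOut listIn _ hpre
  unfold Spec_appendListToDict appendListToDict appendListToDict_alt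
  set firsts := listIn.map (fun i : String × Int => i.1) with hf
  have hD : (PySem.Dict.mk dictOut).keys.Nodup := by
    simpa [PySem.Dict.keys_mk] using hpre
  -- A side: canonical form
  rw [stepA_eq]
  conv_lhs => rw [← List.foldl_map (f := fun i : String × Int => i.1)
    (g := fun (d : PySem.Dict String Int) x => d.insert x (d.getD x 0 + 1))]
  have hnd1 := PySem.Dict.nodup_keys_foldl_insert firsts
    (fun d x => d.getD x 0 + 1) (PySem.Dict.mk dictOut) hD
  rw [PySem.Dict.items_eq_map_keys _ hnd1 0, PySem.Dict.keys_foldl_insert,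
    PySem.Dict.keys_mk, PySem.Set.update_eq_append_filter, List.map_append]
  -- B side: canonical form
  rw [foldB]
  have hkeys : (dictOut.map (fun p : String × Int => (p.1, p.2 + (firsts.count p.1 : Int)))).map
      Prod.fst = dictOut.map Prod.fst := by
    simp [List.map_map, Function.comp]
  rw [hkeys]
  congr 1
  · -- existing keys: original value + its count
    rw [List.map_map]
    apply List.map_congr_left
    intro p hp
    have hv : (PySem.Dict.mk dictOut).getD p.1 0 = p.2 :=
      PySem.Dict.getD_of_mem_items _ hp hD 0
    simp [Function.comp, PySem.Dict.getD_foldl_insert_add_one, hv]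
  · -- new keys: value is just the count
    apply List.map_congr_left
    intro k hk
    have hnot : k ∉ dictOut.map Prod.fst := by
      have := (List.mem_filter.mp hk).2
      intro hmem
      rw [(PySem.Set.contains_iff (dictOut.map Prod.fst) k).mpr hmem] at this
      exact absurd this (by decide)
    have hc : (PySem.Dict.mk dictOut).contains k = false := by
      rw [PySem.Dict.contains_mk, Bool.eq_false_iff]
      intro hcon
      rcases List.any_eq_true.mp hcon with ⟨p, hp, hpk⟩
      exact hnot (List.mem_map.mpr ⟨p, hp, by simpa using hpk⟩)
    simp [PySem.Dict.getD_foldl_insert_add_one,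
      PySem.Dict.getD_of_not_contains _ _ hc]
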